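-- pv_equiv track=rewrite | github.com/rafaelperazzo/programacao-web | moodledata/vpl_data/59/usersdata/126/64272/submittedfiles/testes.py | contalgarismos
-- ===== SOURCE A (Python) =====
-- def lista(numero):
--     lista = []
--     cont=0
--     while numero>0:
--         resto = numero%10
--         cont = cont+1
--         lista.insert(0,resto)
--         numero = numero//10
--     return (lista,cont)
--
-- def contalgarismos(n):
--     cont = 0
--     a=lista(n)[0]
--     for i in range(0,10,1):
--         for j in range(0,len(a),1):
--             if i == a[j]:
--                 cont=cont+1
--                 break
--     return(cont)
-- ===== SOURCE B (Python) =====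
-- def contalgarismos(n):
--     digitos = set()
--     while n > 0:
--         digitos.add(n % 10)
--         n //= 10
--     return len(digitos)
-- ===== Notes on version B (the rewrite author's own statement) =====
-- stated objective: simpler
-- what changed: Replaces building the digit list plus an outer loop over all ten digit values with an inner scan-and-break by one while-loop that collects the digits into a set and returns its size.
import Mathlib
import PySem

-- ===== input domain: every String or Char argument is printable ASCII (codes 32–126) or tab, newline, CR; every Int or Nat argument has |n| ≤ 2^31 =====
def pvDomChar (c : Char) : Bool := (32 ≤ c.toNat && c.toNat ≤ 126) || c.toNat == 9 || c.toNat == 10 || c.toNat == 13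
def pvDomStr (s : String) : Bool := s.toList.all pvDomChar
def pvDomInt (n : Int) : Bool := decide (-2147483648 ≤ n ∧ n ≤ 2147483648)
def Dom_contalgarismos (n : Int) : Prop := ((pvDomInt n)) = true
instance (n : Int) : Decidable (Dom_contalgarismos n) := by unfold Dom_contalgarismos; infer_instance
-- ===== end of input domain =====

-- B replaces A's digit-list construction plus outer loop over the ten digit values with inner scan-and-break
-- by a single while-loop maintaining the set of digits; same return value for every Int.

-- termination measure fact used by both ports' while-loops
theorem pvFloordiv10_toNat_lt (n : Int) (h : n > 0) :
    (PySem.Int.floordiv n 10).toNat < n.toNat := by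
  rw [PySem.Int.floordiv_eq_ediv_of_pos (by norm_num)]
  omega

-- ===== PORT A =====
-- the while-loop of lista: state (lista, cont), resto prepended (lista.insert(0, resto))
def pvListaLoop (numero : Int) (acc : List Int) (cont : Int) : List Int × Int :=
  if h : numero > 0 then
    pvListaLoop (PySem.Int.floordiv numero 10) (PySem.Int.mod numero 10 :: acc) (cont + 1)
  else
    (acc, cont)
termination_by numero.toNat
decreasing_by exact pvFloordiv10_toNat_lt numero h

def lista (numero : Int) : List Int × Int := pvListaLoop numero [] 0

-- inner 'for j in range(0,len(a),1): if i == a[j]: cont += 1; break'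
def pvInner (i : Int) (cont : Int) : List Int → Int
  | [] => cont
  | x :: xs => if i = x then cont + 1 else pvInner i cont xs

def contalgarismos (n : Int) : Int :=
  let a := (lista n).1
  (PySem.List.pyRange 0 10 1).foldl (fun cont i => pvInner i cont a) 0

-- ===== PORT B =====
-- the while-loop: digitos.add(n % 10); n //= 10
def pvAltLoop (n : Int) (digitos : PySem.Set Int) : PySem.Set Int :=
  if h : n > 0 then
    pvAltLoop (PySem.Int.floordiv n 10) (PySem.Set.add digitos (PySem.Int.mod n 10))
  else
    digitos
termination_by n.toNat
decreasing_by exact pvFloordiv10_toNat_lt n h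

def contalgarismos_alt (n : Int) : Int :=
  ((pvAltLoop n PySem.Set.empty).length : Int)

-- ===== PRECONDITION & SPEC =====
def Spec_contalgarismos (n : Int) (out : Int) : Prop := out = contalgarismos_alt n
instance (n : Int) (out : Int) : Decidable (Spec_contalgarismos n out) := by unfold Spec_contalgarismos; infer_instance

-- ===== CLAIM (what is proved, stated in full; the proofs are below) =====
def Claim_equal_contalgarismos : Prop := ∀ (n : Int), Dom_contalgarismos n → Spec_contalgarismos n (contalgarismos n)

-- ===== LEMMAS AND PROOFS =====

-- the digits of n, least significant first (proof-side characterisation of both loops)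
def pvDigits (n : Int) : List Int :=
  if h : n > 0 then PySem.Int.mod n 10 :: pvDigits (PySem.Int.floordiv n 10) else []
termination_by n.toNat
decreasing_by exact pvFloordiv10_toNat_lt n h

theorem pvListaLoop_fst (numero : Int) (acc : List Int) (cont : Int) :
    (pvListaLoop numero acc cont).1 = (pvDigits numero).reverse ++ acc := by
  induction numero, acc, cont using pvListaLoop.induct with
  | case1 numero acc cont h ih =>
    rw [pvListaLoop, pvDigits]
    simp only [h, dite_true]
    rw [ih]
    simp
  | case2 numero acc cont h =>
    rw [pvListaLoop, pvDigits]
    simp only [h, dite_false]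
    simp

theorem pvAltLoop_eq (n : Int) (s : PySem.Set Int) :
    pvAltLoop n s = (pvDigits n).foldl PySem.Set.add s := by
  induction n, s using pvAltLoop.induct with
  | case1 n s h ih =>
    rw [pvAltLoop, pvDigits]
    simp only [h, dite_true]
    rw [ih]
    simp
  | case2 n s h =>
    rw [pvAltLoop, pvDigits]
    simp only [h, dite_false]
    simp

theorem pvDigits_bounds (n : Int) : ∀ x ∈ pvDigits n, 0 ≤ x ∧ x < 10 := by
  induction n using pvDigits.induct with
  | case1 n h ih =>
    rw [pvDigits]
    simp only [h, dite_true, List.mem_cons]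
    rintro x (rfl | hx)
    · exact ⟨PySem.Int.mod_nonneg _ (by norm_num), PySem.Int.mod_lt _ (by norm_num)⟩
    · exact ih x hx
  | case2 n h =>
    rw [pvDigits]
    simp [h]

theorem pvInner_eq (i : Int) (cont : Int) (a : List Int) :
    pvInner i cont a = if i ∈ a then cont + 1 else cont := by
  induction a with
  | nil => simp [pvInner]
  | cons x xs ih =>
    by_cases hx : i = x <;> simp [pvInner, hx, ih]

theorem pvFoldl_count (a : List Int) (l : List Int) (c : Int) :
    l.foldl (fun cont i => pvInner i cont a) c
      = c + ((l.filter (fun i => decide (i ∈ a))).length : Int) := by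
  induction l generalizing c with
  | nil => simp
  | cons x xs ih =>
    rw [List.foldl_cons, pvInner_eq]
    by_cases hx : x ∈ a
    · rw [if_pos hx, ih]
      simp [hx]
      ring
    · rw [if_neg hx, ih]
      simp [hx]

-- two nodup lists with the same members have the same length
theorem pvLength_eq_of_nodup (l₁ l₂ : List Int) (h₁ : l₁.Nodup) (h₂ : l₂.Nodup)
    (hm : ∀ x, x ∈ l₁ ↔ x ∈ l₂) : l₁.length = l₂.length :=
  ((List.perm_ext_iff_of_nodup h₁ h₂).mpr hm).length_eq

-- ===== VERDICT (by name: the statement is the Claim_ definition above) =====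
theorem contalgarismos_spec : Claim_equal_contalgarismos := by
  intro n _
  unfold Spec_contalgarismos
  have hB : contalgarismos_alt n = ((PySem.Set.ofList (pvDigits n)).length : Int) := by
    simp only [contalgarismos_alt, pvAltLoop_eq]
    rw [PySem.Set.ofList_eq_foldl]
    rfl
  have hA : contalgarismos n
      = (0 : Int) + (((PySem.List.pyRange 0 10 1).filter
          (fun i => decide (i ∈ ((pvDigits n).reverse ++ ([] : List Int))))).length : Int) := by
    simp only [contalgarismos, lista, pvListaLoop_fst]
    exact pvFoldl_count _ _ _
  rw [hA, hB]
  have hrange : PySem.List.pyRange 0 10 1 = [0,1,2,3,4,5,6,7,8,9] := by decide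
  rw [hrange]
  have hlen : (([0,1,2,3,4,5,6,7,8,9].filter
        (fun i => decide (i ∈ ((pvDigits n).reverse ++ ([] : List Int))))).length)
      = (PySem.Set.ofList (pvDigits n)).length := by
    apply pvLength_eq_of_nodup
    · exact List.Nodup.filter _ (by decide)
    · exact PySem.Set.nodup_ofList _
    · intro x
      simp only [List.mem_filter, PySem.Set.mem_ofList, List.append_nil,
        List.mem_reverse, decide_eq_true_eq]
      constructor
      · rintro ⟨_, hx⟩; exact hx
      · intro hx
        refine ⟨?_, hx⟩
        have := pvDigits_bounds n x hx
        have h0 : 0 ≤ x := this.1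
        have h10 : x < 10 := this.2
        interval_cases x <;> simp
  rw [hlen]
  ring
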